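-- pv_equiv track=rewrite | github.com/Engi-Benji/Advent-of-Code | day3pt2.py | leftValue
-- ===== SOURCE A (Python) =====
-- def leftValue(lineCharList, char):
--     value = []
--     count = 0
--     for point in lineCharList[char[1]]:
--         if "." in point and count < char[2]:
--             value = []
--         elif not "." in point and count < char[2]:
--             value.append(point)
--         count += 1
--
--     return "".join(value)
-- ===== SOURCE B (Python) =====
-- def leftValue(lineCharList, char):
--     # Take the prefix before index char[2] (clamped at 0), then walk it
--     # backwards collecting elements until the first dot-containing one.
--     prefix = lineCharList[char[1]][:max(char[2], 0)]
--     parts = []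
--     for point in reversed(prefix):
--         if "." in point:
--             break
--         parts.append(point)
--     return "".join(reversed(parts))
-- ===== Notes on version B (the rewrite author's own statement) =====
-- stated objective: alternative
-- what changed: Replaces the forward reset-accumulator scan of the whole row with a backward walk over the clamped prefix that stops at the first dot-containing element (early exit instead of resetting).
import Mathlib
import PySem

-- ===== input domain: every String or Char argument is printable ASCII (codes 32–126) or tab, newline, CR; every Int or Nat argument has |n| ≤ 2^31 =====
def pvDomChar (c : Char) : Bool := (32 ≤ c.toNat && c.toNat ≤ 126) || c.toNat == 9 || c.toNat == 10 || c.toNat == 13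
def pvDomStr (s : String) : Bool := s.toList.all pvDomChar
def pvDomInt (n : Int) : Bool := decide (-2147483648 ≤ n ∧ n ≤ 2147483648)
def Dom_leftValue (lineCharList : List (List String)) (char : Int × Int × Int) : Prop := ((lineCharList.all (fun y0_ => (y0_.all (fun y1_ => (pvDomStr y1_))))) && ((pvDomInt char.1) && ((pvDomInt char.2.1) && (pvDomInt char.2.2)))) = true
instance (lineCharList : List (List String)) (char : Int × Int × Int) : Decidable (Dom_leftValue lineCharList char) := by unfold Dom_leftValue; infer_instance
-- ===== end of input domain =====

-- B walks the clamped prefix backwards and stops at the first dot element, instead of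
-- A's forward scan that resets an accumulator; return values agree wherever A returns.

-- ===== PORT A =====
-- literal port of A's forward loop: state (value, count), branches in source order
def leftValue (lineCharList : List (List String)) (char : Int × Int × Int) : String :=
  match PySem.List.pyGet? lineCharList char.2.1 with
  | none => ""   -- IndexError in Python; excluded by Pre_leftValue
  | some line =>
    let st := line.foldl (fun (st : List String × Int) point =>
      if PySem.Str.isIn "." point && decide (st.2 < char.2.2) then ([], st.2 + 1)
      else if !PySem.Str.isIn "." point && decide (st.2 < char.2.2) then (st.1 ++ [point], st.2 + 1)
      else (st.1, st.2 + 1)) ([], 0)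
    PySem.Str.join "" st.1

-- ===== PORT B =====
-- B's backward loop with break: recursion over the reversed prefix
def leftValueCollect : List String → List String → List String
  | [], parts => parts
  | point :: rest, parts =>
    if PySem.Str.isIn "." point then parts else leftValueCollect rest (parts ++ [point])

def leftValue_alt (lineCharList : List (List String)) (char : Int × Int × Int) : String :=
  match PySem.List.pyGet? lineCharList char.2.1 with
  | none => ""   -- IndexError in Python; excluded by Pre_leftValue
  | some line =>
    let pre := PySem.List.slice line none (some (max char.2.2 0))
    PySem.Str.join "" (leftValueCollect pre.reverse []).reverse

-- ===== PRECONDITION & SPEC =====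
-- A (and B) raise IndexError exactly when char[1] is out of range for lineCharList
def Pre_leftValue (lineCharList : List (List String)) (char : Int × Int × Int) : Prop :=
  PySem.Raise.InRange lineCharList.length char.2.1
instance (lineCharList : List (List String)) (char : Int × Int × Int) : Decidable (Pre_leftValue lineCharList char) := by unfold Pre_leftValue; infer_instance

def pvWitness_leftValue : List (List String) × (Int × Int × Int) :=
  ([["a", ".", "b", "c"]], (0, 0, 3))

def Spec_leftValue (lineCharList : List (List String)) (char : Int × Int × Int) (out : String) : Prop := out = leftValue_alt lineCharList char
instance (lineCharList : List (List String)) (char : Int × Int × Int) (out : String) : Decidable (Spec_leftValue lineCharList char out) := by unfold Spec_leftValue; infer_instance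

-- ===== CLAIM (what is proved, stated in full; the proofs are below) =====
def Claim_equal_leftValue : Prop := ∀ (lineCharList : List (List String)) (char : Int × Int × Int), Dom_leftValue lineCharList char → Pre_leftValue lineCharList char → Spec_leftValue lineCharList char (leftValue lineCharList char)

-- ===== LEMMAS AND PROOFS =====

-- the pure reset-accumulator fold that A performs on the first char[2] elements
def resetFold (l : List String) (v : List String) : List String :=
  l.foldl (fun acc p => if PySem.Str.isIn "." p then [] else acc ++ [p]) v

lemma resetFold_nil (v : List String) : resetFold [] v = v := rfl

lemma resetFold_cons (p : String) (l : List String) (v : List String) :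
    resetFold (p :: l) v = resetFold l (if PySem.Str.isIn "." p then [] else v ++ [p]) := rfl

lemma leftValueCollect_acc (l : List String) (acc : List String) :
    leftValueCollect l acc = acc ++ leftValueCollect l [] := by
  induction l generalizing acc with
  | nil => simp [leftValueCollect]
  | cons p rest ih =>
    by_cases h : PySem.Str.isIn "." p = true
    · rw [leftValueCollect, if_pos h, leftValueCollect, if_pos h, List.append_nil]
    · rw [leftValueCollect, if_neg h, leftValueCollect, if_neg h, ih (acc ++ [p]),
        ih ([] ++ [p]), List.nil_append, List.append_assoc]

-- A's stateful fold computes resetFold on the clamped prefix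
lemma foldA_eq_resetFold (k : Int) (l : List String) (v : List String) (c : Int) :
    (l.foldl (fun (st : List String × Int) point =>
      if PySem.Str.isIn "." point && decide (st.2 < k) then ([], st.2 + 1)
      else if !PySem.Str.isIn "." point && decide (st.2 < k) then (st.1 ++ [point], st.2 + 1)
      else (st.1, st.2 + 1)) (v, c)).1
    = resetFold (l.take (k - c).toNat) v := by
  induction l generalizing v c with
  | nil => simp [resetFold]
  | cons p rest ih =>
    rw [List.foldl_cons]
    by_cases hc : c < k
    · have ht : (k - c).toNat = (k - (c + 1)).toNat + 1 := by omega
      rw [ht, List.take_succ_cons, resetFold_cons]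
      by_cases hd : PySem.Chars.isIn ['.'] p.toList = true
      · have hd' : PySem.Str.isIn "." p = true := hd
        rw [if_pos (by simp [hd, hc]), if_pos hd']
        exact ih [] (c + 1)
      · have hd' : ¬ PySem.Str.isIn "." p = true := hd
        rw [if_neg (by simp [hd]), if_pos (by simp [hd, hc]), if_neg hd']
        exact ih (v ++ [p]) (c + 1)
    · have ht : (k - c).toNat = 0 := by omega
      have ht' : (k - (c + 1)).toNat = 0 := by omega
      rw [ht, List.take_zero, resetFold_nil,
        if_neg (by simp [hc]), if_neg (by simp [hc])]
      rw [ih v (c + 1), ht', List.take_zero, resetFold_nil]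

-- resetFold is the no-dot suffix of the prefix, which is what B's backward walk collects
lemma resetFold_eq_collect (l : List String) (v : List String) :
    resetFold l v = (if l.any (fun p => PySem.Str.isIn "." p) then [] else v)
      ++ (leftValueCollect l.reverse []).reverse := by
  induction l using List.reverseRecOn generalizing v with
  | nil => simp [resetFold, leftValueCollect]
  | append_singleton ys x ih =>
    rw [resetFold, List.foldl_append]
    rw [show List.foldl (fun acc p => if PySem.Str.isIn "." p then [] else acc ++ [p]) v ys
        = resetFold ys v from rfl]
    rw [List.reverse_append, List.reverse_singleton, List.singleton_append, leftValueCollect]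
    by_cases hd : PySem.Chars.isIn ['.'] x.toList = true
    · have hd' : PySem.Str.isIn "." x = true := hd
      rw [List.foldl_cons, List.foldl_nil, if_pos hd', if_pos hd']
      simp [hd]
    · have hd' : ¬ PySem.Str.isIn "." x = true := hd
      rw [List.foldl_cons, List.foldl_nil, if_neg hd', if_neg hd',
        leftValueCollect_acc, ih v]
      simp [hd, List.append_assoc]

-- ===== VERDICT (by name: the statement is the Claim_ definition above) =====
theorem leftValue_spec : Claim_equal_leftValue := by
  intro lineCharList char _hdom hpre
  unfold Spec_leftValue leftValue leftValue_alt
  cases hg : PySem.List.pyGet? lineCharList char.2.1 with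
  | none =>
    exact absurd hpre
      (by simpa [Pre_leftValue] using (PySem.List.pyGet?_eq_none_iff lineCharList char.2.1).mp hg)
  | some line =>
    simp only []
    have hmax : (0 : Int) ≤ max char.2.2 0 := le_max_right _ _
    rw [PySem.List.slice_to _ hmax]
    have hk : (max char.2.2 0).toNat = (char.2.2 - 0).toNat := by omega
    rw [hk, foldA_eq_resetFold char.2.2 line [] 0, resetFold_eq_collect]
    congr 1
    simp
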